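-- pv_equiv track=rewrite | github.com/gumblex/whisper_vad | whisper_vad.py | fix_whisper_timestamps
-- ===== SOURCE A (Python) =====
-- class WhisperStuck(RuntimeError):
--     pass
--
-- def fix_whisper_timestamps(
--     last_segment, segments, result_offset_ms: int, start_ms: int, end_ms: int,
--     overlap_chars=6, is_retry=False
-- ):
--     fixed = []
--     if last_segment:
--         fixed.append(last_segment)
--     for t1, t2, txt in segments:
--         t1 += result_offset_ms
--         t2 += result_offset_ms
--         if t1 < start_ms:
--             t1 = start_ms
--         elif t1 >= end_ms:
--             continue
--         if t2 > end_ms: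
--             t2 = end_ms
--         txt = txt.strip()
--         if t1 == t2 or not txt:
--             continue
--         if not fixed:
--             fixed.append((t1, t2, txt))
--             continue
--         last_t1, last_t2, last_txt = fixed[-1]
--         if t1 < last_t2:
--             if txt == last_txt:
--                 if not is_retry:
--                     raise WhisperStuck()
--                 fixed[-1] = (last_t1, t2, last_txt)
--             elif last_txt.endswith(txt[:overlap_chars]):
--                 fixed[-1] = (last_t1, t2, last_txt + txt[overlap_chars:])
--             else:
--                 fixed[-1] = (last_t1, t1, last_txt)
--                 fixed.append((t1, t2, txt))
--         else:
--             fixed.append((t1, t2, txt))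
--     return fixed
-- ===== SOURCE B (Python) =====
-- class WhisperStuck(RuntimeError):
--     pass
--
--
-- def fix_whisper_timestamps(
--     last_segment, segments, result_offset_ms: int, start_ms: int, end_ms: int,
--     overlap_chars=6, is_retry=False
-- ):
--     # Stage 1: materialize the full normalized array (closed-form clamps).
--     buf = [last_segment] if last_segment else []
--     for t1, t2, txt in segments:
--         t1 += result_offset_ms
--         t2 += result_offset_ms
--         txt = txt.strip()
--         if t1 < max(start_ms, end_ms) and txt:
--             a, b = max(t1, start_ms), min(t2, end_ms)
--             if a != b:
--                 buf.append((a, b, txt))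
--     # Stage 2: merge overlaps in place with a read/write two-pointer compaction.
--     w = 0
--     for r in range(1, len(buf)):
--         t1, t2, txt = buf[r]
--         c1, c2, ctxt = buf[w]
--         if t1 >= c2:
--             w += 1
--             buf[w] = (t1, t2, txt)
--         elif txt == ctxt:
--             if not is_retry:
--                 raise WhisperStuck()
--             buf[w] = (c1, t2, ctxt)
--         elif ctxt.endswith(txt[:overlap_chars]):
--             buf[w] = (c1, t2, ctxt + txt[overlap_chars:])
--         else:
--             buf[w] = (c1, t1, ctxt)
--             w += 1
--             buf[w] = (t1, t2, txt)
--     return buf[:w + 1]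
-- ===== Notes on version B (the rewrite author's own statement) =====
-- stated objective: alternative
-- what changed: A merges inside the normalize loop by appending to a growing list and rewriting its last element; B first materializes the full normalized array using closed-form max/min clamps and then merges overlaps in place with a read/write two-pointer compaction over that array, returning a prefix slice.
import Mathlib
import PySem

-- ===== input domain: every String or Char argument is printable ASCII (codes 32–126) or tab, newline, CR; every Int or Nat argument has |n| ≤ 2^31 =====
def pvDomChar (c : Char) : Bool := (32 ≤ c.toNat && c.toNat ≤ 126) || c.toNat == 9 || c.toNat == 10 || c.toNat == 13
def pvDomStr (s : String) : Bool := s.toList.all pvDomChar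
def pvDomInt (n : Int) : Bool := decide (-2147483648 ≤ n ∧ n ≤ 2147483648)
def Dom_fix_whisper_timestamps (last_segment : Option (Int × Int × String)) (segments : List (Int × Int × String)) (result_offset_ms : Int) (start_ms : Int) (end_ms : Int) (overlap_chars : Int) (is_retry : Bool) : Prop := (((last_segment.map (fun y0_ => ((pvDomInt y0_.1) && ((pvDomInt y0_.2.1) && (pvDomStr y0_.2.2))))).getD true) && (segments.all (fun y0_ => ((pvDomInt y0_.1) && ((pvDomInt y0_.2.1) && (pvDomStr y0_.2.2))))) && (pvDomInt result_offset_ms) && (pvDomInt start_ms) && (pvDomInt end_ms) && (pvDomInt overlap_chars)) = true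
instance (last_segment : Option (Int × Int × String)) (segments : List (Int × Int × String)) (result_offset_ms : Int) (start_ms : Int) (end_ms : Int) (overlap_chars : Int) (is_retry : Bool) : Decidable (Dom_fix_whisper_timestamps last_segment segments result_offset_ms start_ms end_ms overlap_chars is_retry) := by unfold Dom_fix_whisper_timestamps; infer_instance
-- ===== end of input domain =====

-- B replaces A's single append-and-rewrite-last merge loop by a materialized normalized array
-- (closed-form max/min clamps) compacted in place with a read/write two-pointer sweep
-- (objective: alternative); both Pythons raise WhisperStuck on the same inputs (excluded by Pre_).

-- ===== PORT A =====
-- A's loop body after the t1 clamp / `elif t1 >= end_ms: continue` step (the Python falls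
-- through into this shared remainder of the body; `fixed[-1] = x` is dropLast ++ [x]).
def pvACore (is_retry : Bool) (overlap_chars : Int) (fixed : List (Int × Int × String))
    (t1 t2 : Int) (txt : String) : List (Int × Int × String) :=
  if t1 = t2 ∨ txt = "" then fixed
  else
    match fixed.getLast? with
    | none => fixed ++ [(t1, t2, txt)]
    | some (last_t1, last_t2, last_txt) =>
      if t1 < last_t2 then
        if txt = last_txt then
          -- Python raises WhisperStuck here when is_retry = false; Pre_ excludes such inputs,
          -- so the port's value there (the is_retry value) is unclaimed.
          fixed.dropLast ++ [(last_t1, t2, last_txt)]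
        else if PySem.Str.endswith last_txt (PySem.Str.slice txt none (some overlap_chars)) then
          fixed.dropLast ++ [(last_t1, t2, last_txt ++ PySem.Str.slice txt (some overlap_chars) none)]
        else
          fixed.dropLast ++ [(last_t1, t1, last_txt)] ++ [(t1, t2, txt)]
      else fixed ++ [(t1, t2, txt)]

def fix_whisper_timestamps (last_segment : Option (Int × Int × String)) (segments : List (Int × Int × String)) (result_offset_ms : Int) (start_ms : Int) (end_ms : Int) (overlap_chars : Int) (is_retry : Bool) : List (Int × Int × String) :=
  let fixed0 : List (Int × Int × String) := match last_segment with | some seg => [seg] | none => []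
  segments.foldl (fun fixed seg =>
    let t1 := seg.1 + result_offset_ms
    let t2 := seg.2.1 + result_offset_ms
    if t1 < start_ms then
      pvACore is_retry overlap_chars fixed start_ms (if t2 > end_ms then end_ms else t2) (PySem.Str.strip seg.2.2)
    else if t1 ≥ end_ms then fixed
    else
      pvACore is_retry overlap_chars fixed t1 (if t2 > end_ms then end_ms else t2) (PySem.Str.strip seg.2.2)) fixed0

-- ===== PORT B =====
-- B's stage 2: `for r in range(1, len(buf))` with read index r and write index w; every index
-- used is provably in range, so list indexing is ported with getD (the default is never hit);
-- w ≥ 0 always, so Python's int w is ported as Nat.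
def pvCompact (is_retry : Bool) (overlap_chars : Int) (buf0 : List (Int × Int × String)) :
    List (Int × Int × String) :=
  let st := (List.range' 1 (buf0.length - 1)).foldl
    (fun (st : List (Int × Int × String) × Nat) r =>
      let buf := st.1
      let w := st.2
      let n := buf.getD r (0, 0, "")
      let c := buf.getD w (0, 0, "")
      if n.1 ≥ c.2.1 then (buf.set (w + 1) n, w + 1)
      else if n.2.2 = c.2.2 then
        -- Python B raises WhisperStuck here when is_retry = false (same point as A); outside Pre_.
        (buf.set w (c.1, n.2.1, c.2.2), w)
      else if PySem.Str.endswith c.2.2 (PySem.Str.slice n.2.2 none (some overlap_chars)) then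
        (buf.set w (c.1, n.2.1, c.2.2 ++ PySem.Str.slice n.2.2 (some overlap_chars) none), w)
      else ((buf.set w (c.1, n.1, c.2.2)).set (w + 1) n, w + 1)) (buf0, 0)
  st.1.take (st.2 + 1)

def fix_whisper_timestamps_alt (last_segment : Option (Int × Int × String)) (segments : List (Int × Int × String)) (result_offset_ms : Int) (start_ms : Int) (end_ms : Int) (overlap_chars : Int) (is_retry : Bool) : List (Int × Int × String) :=
  let buf := segments.foldl (fun buf seg =>
    let t1 := seg.1 + result_offset_ms
    let t2 := seg.2.1 + result_offset_ms
    let txt := PySem.Str.strip seg.2.2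
    if t1 < max start_ms end_ms ∧ txt ≠ "" then
      let a := max t1 start_ms
      let b := min t2 end_ms
      if a ≠ b then buf ++ [(a, b, txt)] else buf
    else buf) (match last_segment with | some seg => [seg] | none => [])
  pvCompact is_retry overlap_chars buf

-- ===== PRECONDITION & SPEC =====
-- Standalone copy of the offset/clamp/strip normalization, used only by Pre_ (never by a port).
def pvPreNorm (result_offset_ms start_ms end_ms : Int) (seg : Int × Int × String) :
    Option (Int × Int × String) :=
  let t1 := seg.1 + result_offset_ms
  let t2 := seg.2.1 + result_offset_ms
  if ¬ t1 < start_ms ∧ t1 ≥ end_ms then none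
  else
    let t1 := if t1 < start_ms then start_ms else t1
    let t2 := min t2 end_ms
    let txt := PySem.Str.strip seg.2.2
    if t1 = t2 ∨ txt = "" then none else some (t1, t2, txt)

-- True iff, scanning the normalized segments while keeping only the open segment's end time and
-- text, some segment overlaps the open one with identical text — exactly where A (and B) raise
-- WhisperStuck when is_retry is False.
def pvRaiseLoop (overlap_chars : Int) : Option (Int × String) → List (Int × Int × String) → Bool
  | _, [] => false
  | none, n :: rest => pvRaiseLoop overlap_chars (some (n.2.1, n.2.2)) rest
  | some (c2, ctxt), n :: rest =>
    if n.1 ≥ c2 then pvRaiseLoop overlap_chars (some (n.2.1, n.2.2)) rest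
    else if n.2.2 = ctxt then true
    else if PySem.Str.endswith ctxt (PySem.Str.slice n.2.2 none (some overlap_chars)) then
      pvRaiseLoop overlap_chars (some (n.2.1, ctxt ++ PySem.Str.slice n.2.2 (some overlap_chars) none)) rest
    else pvRaiseLoop overlap_chars (some (n.2.1, n.2.2)) rest

-- Pre_ excludes EXACTLY the inputs on which the Python A raises WhisperStuck (is_retry False and
-- some normalized segment overlapping the evolving open segment with identical text); B raises
-- there too, and no input on which A returns a value is excluded.
def Pre_fix_whisper_timestamps (last_segment : Option (Int × Int × String)) (segments : List (Int × Int × String)) (result_offset_ms : Int) (start_ms : Int) (end_ms : Int) (overlap_chars : Int) (is_retry : Bool) : Prop :=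
  is_retry = true ∨
    pvRaiseLoop overlap_chars (last_segment.map (fun s => (s.2.1, s.2.2)))
      (segments.filterMap (pvPreNorm result_offset_ms start_ms end_ms)) = false
instance (last_segment : Option (Int × Int × String)) (segments : List (Int × Int × String)) (result_offset_ms : Int) (start_ms : Int) (end_ms : Int) (overlap_chars : Int) (is_retry : Bool) : Decidable (Pre_fix_whisper_timestamps last_segment segments result_offset_ms start_ms end_ms overlap_chars is_retry) := by unfold Pre_fix_whisper_timestamps; infer_instance

def pvWitness_fix_whisper_timestamps : (Option (Int × Int × String)) × (List (Int × Int × String)) × Int × Int × Int × Int × Bool :=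
  (none, [(0, 5, "a"), (2, 9, "b")], 0, 0, 100, 6, false)

def Spec_fix_whisper_timestamps (last_segment : Option (Int × Int × String)) (segments : List (Int × Int × String)) (result_offset_ms : Int) (start_ms : Int) (end_ms : Int) (overlap_chars : Int) (is_retry : Bool) (out : List (Int × Int × String)) : Prop := out = fix_whisper_timestamps_alt last_segment segments result_offset_ms start_ms end_ms overlap_chars is_retry
instance (last_segment : Option (Int × Int × String)) (segments : List (Int × Int × String)) (result_offset_ms : Int) (start_ms : Int) (end_ms : Int) (overlap_chars : Int) (is_retry : Bool) (out : List (Int × Int × String)) : Decidable (Spec_fix_whisper_timestamps last_segment segments result_offset_ms start_ms end_ms overlap_chars is_retry out) := by unfold Spec_fix_whisper_timestamps; infer_instance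

-- ===== CLAIM (what is proved, stated in full; the proofs are below) =====
def Claim_equal_fix_whisper_timestamps : Prop := ∀ (last_segment : Option (Int × Int × String)) (segments : List (Int × Int × String)) (result_offset_ms : Int) (start_ms : Int) (end_ms : Int) (overlap_chars : Int) (is_retry : Bool), Dom_fix_whisper_timestamps last_segment segments result_offset_ms start_ms end_ms overlap_chars is_retry → Pre_fix_whisper_timestamps last_segment segments result_offset_ms start_ms end_ms overlap_chars is_retry → Spec_fix_whisper_timestamps last_segment segments result_offset_ms start_ms end_ms overlap_chars is_retry (fix_whisper_timestamps last_segment segments result_offset_ms start_ms end_ms overlap_chars is_retry)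

-- ===== LEMMAS AND PROOFS =====

theorem pvWitness_ok :
    Dom_fix_whisper_timestamps pvWitness_fix_whisper_timestamps.1 pvWitness_fix_whisper_timestamps.2.1 pvWitness_fix_whisper_timestamps.2.2.1 pvWitness_fix_whisper_timestamps.2.2.2.1 pvWitness_fix_whisper_timestamps.2.2.2.2.1 pvWitness_fix_whisper_timestamps.2.2.2.2.2.1 pvWitness_fix_whisper_timestamps.2.2.2.2.2.2 ∧
    Pre_fix_whisper_timestamps pvWitness_fix_whisper_timestamps.1 pvWitness_fix_whisper_timestamps.2.1 pvWitness_fix_whisper_timestamps.2.2.1 pvWitness_fix_whisper_timestamps.2.2.2.1 pvWitness_fix_whisper_timestamps.2.2.2.2.1 pvWitness_fix_whisper_timestamps.2.2.2.2.2.1 pvWitness_fix_whisper_timestamps.2.2.2.2.2.2 := by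
  decide

-- A-side normalization as an Option (proof-side characterization of A's skip/clamp chain).
def pvNormalize (result_offset_ms start_ms end_ms : Int) (seg : Int × Int × String) :
    Option (Int × Int × String) :=
  let t1 := seg.1 + result_offset_ms
  let t2 := seg.2.1 + result_offset_ms
  if ¬ t1 < start_ms ∧ t1 ≥ end_ms then none
  else
    let t1 := if t1 < start_ms then start_ms else t1
    let t2 := min t2 end_ms
    let txt := PySem.Str.strip seg.2.2
    if t1 = t2 ∨ txt = "" then none else some (t1, t2, txt)

-- A-side merge step = pvACore without the drop guard (the guard is subsumed by pvNormalize).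
def pvMergeStep (is_retry : Bool) (overlap_chars : Int) (fixed : List (Int × Int × String))
    (n : Int × Int × String) : List (Int × Int × String) :=
  match fixed.getLast? with
  | none => fixed ++ [n]
  | some (last_t1, last_t2, last_txt) =>
    if n.1 < last_t2 then
      if n.2.2 = last_txt then
        fixed.dropLast ++ [(last_t1, n.2.1, last_txt)]
      else if PySem.Str.endswith last_txt (PySem.Str.slice n.2.2 none (some overlap_chars)) then
        fixed.dropLast ++ [(last_t1, n.2.1, last_txt ++ PySem.Str.slice n.2.2 (some overlap_chars) none)]
      else
        fixed.dropLast ++ [(last_t1, n.1, last_txt)] ++ [n]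
    else fixed ++ [n]

-- "skip-or-step" loop body combinator.
def pvSkipStep {α β γ : Type} (f : α → Option β) (g : γ → β → γ) (acc : γ) (x : α) : γ :=
  (f x).elim acc (g acc)

theorem pvMinEq (t2 e : Int) : (if t2 > e then e else t2) = min t2 e := by
  simp only [min_def]; split_ifs <;> omega

theorem pvCoreNorm (ir : Bool) (oc : Int) (fixed : List (Int × Int × String))
    (t1 t2 : Int) (txt : String) :
    pvACore ir oc fixed t1 t2 txt =
      ((if t1 = t2 ∨ txt = "" then none else some (t1, t2, txt) : Option (Int × Int × String)).elim
        fixed (pvMergeStep ir oc fixed)) := by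
  by_cases h : t1 = t2 ∨ txt = ""
  · simp [pvACore, h]
  · simp [pvACore, pvMergeStep, h]

-- A's loop body is pvNormalize followed by the guard-free merge step.
theorem pvBodyEq (is_retry : Bool) (result_offset_ms start_ms end_ms overlap_chars : Int) :
    (fun (fixed : List (Int × Int × String)) (seg : Int × Int × String) =>
      let t1 := seg.1 + result_offset_ms
      let t2 := seg.2.1 + result_offset_ms
      if t1 < start_ms then
        pvACore is_retry overlap_chars fixed start_ms (if t2 > end_ms then end_ms else t2) (PySem.Str.strip seg.2.2)
      else if t1 ≥ end_ms then fixed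
      else
        pvACore is_retry overlap_chars fixed t1 (if t2 > end_ms then end_ms else t2) (PySem.Str.strip seg.2.2)) =
    pvSkipStep (pvNormalize result_offset_ms start_ms end_ms) (pvMergeStep is_retry overlap_chars) := by
  funext fixed seg
  simp only [pvCoreNorm, pvMinEq, pvNormalize, pvSkipStep]
  by_cases h1 : seg.1 + result_offset_ms < start_ms <;>
    by_cases h2 : seg.1 + result_offset_ms ≥ end_ms <;>
      simp [h1, h2]

-- foldl of a "skip-or-step" body over xs = foldl of the step over the filterMap.
theorem pvFoldlFilterMap {α β γ : Type} (f : α → Option β) (g : γ → β → γ) :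
    ∀ (xs : List α) (init : γ),
      xs.foldl (pvSkipStep f g) init = (xs.filterMap f).foldl g init := by
  intro xs
  induction xs with
  | nil => intro init; rfl
  | cons x xs ih =>
    intro init
    cases hfx : f x <;> simp [pvSkipStep, hfx, ih]

-- B's normalization fold builds init ++ the filterMap of the same pvNormalize.
theorem pvBNormBody (result_offset_ms start_ms end_ms : Int)
    (buf : List (Int × Int × String)) (seg : Int × Int × String) :
    (let t1 := seg.1 + result_offset_ms
     let t2 := seg.2.1 + result_offset_ms
     let txt := PySem.Str.strip seg.2.2
     if t1 < max start_ms end_ms ∧ txt ≠ "" then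
       let a := max t1 start_ms
       let b := min t2 end_ms
       if a ≠ b then buf ++ [(a, b, txt)] else buf
     else buf) =
    buf ++ (pvNormalize result_offset_ms start_ms end_ms seg).toList := by
  simp only [pvNormalize]
  by_cases h1 : seg.1 + result_offset_ms < start_ms <;>
    by_cases h2 : seg.1 + result_offset_ms ≥ end_ms <;>
      by_cases h3 : PySem.Str.strip seg.2.2 = "" <;>
        simp [h1, h2, h3, max_def, min_def] <;> split_ifs <;> simp_all <;> omega

theorem pvFoldlAppendToList {α β : Type} (f : α → Option β) :
    ∀ (xs : List α) (init : List β),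
      xs.foldl (fun acc x => acc ++ (f x).toList) init = init ++ xs.filterMap f := by
  intro xs
  induction xs with
  | nil => intro init; simp
  | cons x xs ih =>
    intro init
    cases hfx : f x <;> simp [hfx, ih]

-- Rewriting the last element of a nonempty list.
theorem pvSetLast {α : Type} (x : α) : ∀ (g : List α), g ≠ [] → g.set (g.length - 1) x = g.dropLast ++ [x] := by
  intro g
  induction g with
  | nil => intro h; exact absurd rfl h
  | cons a t ih =>
    intro _
    cases t with
    | nil => rfl
    | cons b u =>
      have hrec := ih (by simp)
      simp only [List.length_cons, Nat.add_sub_cancel] at hrec ⊢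
      simp only [List.set_cons_succ, List.dropLast_cons₂, List.cons_append, hrec]

-- The two-pointer invariant: after processing read indices 1..k of the fixed-length buffer,
-- the buffer is (merged prefix of the first k+1 stream elements) ++ untouched tail of s, and
-- the write pointer sits on the merged prefix's last element.
theorem pvCompactInv (ir : Bool) (oc : Int) (s : List (Int × Int × String)) (hs : s ≠ []) :
    ∀ k, k < s.length →
      (List.range' 1 k).foldl
        (fun (st : List (Int × Int × String) × Nat) r =>
          let buf := st.1
          let w := st.2
          let n := buf.getD r (0, 0, "")
          let c := buf.getD w (0, 0, "")
          if n.1 ≥ c.2.1 then (buf.set (w + 1) n, w + 1)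
          else if n.2.2 = c.2.2 then (buf.set w (c.1, n.2.1, c.2.2), w)
          else if PySem.Str.endswith c.2.2 (PySem.Str.slice n.2.2 none (some oc)) then
            (buf.set w (c.1, n.2.1, c.2.2 ++ PySem.Str.slice n.2.2 (some oc) none), w)
          else ((buf.set w (c.1, n.1, c.2.2)).set (w + 1) n, w + 1)) (s, 0) =
      (((s.take (k + 1)).foldl (pvMergeStep ir oc) []) ++
         s.drop ((s.take (k + 1)).foldl (pvMergeStep ir oc) []).length,
       ((s.take (k + 1)).foldl (pvMergeStep ir oc) []).length - 1) ∧
      1 ≤ ((s.take (k + 1)).foldl (pvMergeStep ir oc) []).length ∧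
      ((s.take (k + 1)).foldl (pvMergeStep ir oc) []).length ≤ k + 1 := by
  intro k
  induction k with
  | zero =>
    intro _
    obtain ⟨a, t, rfl⟩ : ∃ a t, s = a :: t := by
      cases s with
      | nil => exact absurd rfl hs
      | cons a t => exact ⟨a, t, rfl⟩
    simp [pvMergeStep]
  | succ k ih =>
    intro hk
    have hk' : k < s.length := Nat.lt_of_succ_lt hk
    obtain ⟨hst, h1, hle⟩ := ih hk'
    rw [List.range'_1_concat, List.foldl_append, hst]
    set g := (s.take (k + 1)).foldl (pvMergeStep ir oc) [] with hgdef
    simp only [List.foldl_cons, List.foldl_nil]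
    have hks : k + 1 < s.length := hk
    have hgs : g.length < s.length := by omega
    have hg0 : g ≠ [] := by
      intro h
      rw [h] at h1
      simp at h1
    have hn : (g ++ s.drop g.length).getD (1 + k) (0, 0, "") = s[k + 1] := by
      rw [List.getD_append_right _ _ _ _ (by omega)]
      have hidx : g.length + (1 + k - g.length) = k + 1 := by omega
      rw [List.getD_eq_getElem?_getD, List.getElem?_drop, hidx, List.getElem?_eq_getElem hks]
      rfl
    have hlt1 : g.length - 1 < g.length := by omega
    have hc : (g ++ s.drop g.length).getD (g.length - 1) (0, 0, "") = g.getD (g.length - 1) (0, 0, "") :=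
      List.getD_append _ _ _ _ hlt1
    have hlast : g.getLast? = some (g.getD (g.length - 1) (0, 0, "")) := by
      rw [List.getLast?_eq_getElem?, List.getD_eq_getElem?_getD, List.getElem?_eq_getElem hlt1]
      rfl
    have htake2 : s.take (k + 1 + 1) = s.take (k + 1) ++ [s[k + 1]] := by
      rw [List.take_add_one, List.getElem?_eq_getElem hks]
      rfl
    have hg' : (s.take (k + 1 + 1)).foldl (pvMergeStep ir oc) [] = pvMergeStep ir oc g s[k + 1] := by
      rw [htake2, List.foldl_append]
      rfl
    have hsetR : ∀ (h : List (Int × Int × String)) (x : Int × Int × String), h.length = g.length →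
        (h ++ s.drop g.length).set g.length x = (h ++ [x]) ++ s.drop (g.length + 1) := by
      intro h x hh
      have h0 : g.length - h.length = 0 := by omega
      rw [List.set_append_right _ _ (by omega), h0, List.drop_eq_getElem_cons hgs]
      simp only [List.set_cons_zero, List.append_assoc, List.singleton_append]
    have hsetL : ∀ (x : Int × Int × String),
        (g ++ s.drop g.length).set (g.length - 1) x = (g.dropLast ++ [x]) ++ s.drop g.length := by
      intro x
      rw [List.set_append_left _ _ hlt1, pvSetLast x g hg0]
    have hdl : g.dropLast.length = g.length - 1 := by simp
    have hidx2 : g.length - 1 + 1 = g.length := by omega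
    rw [hn, hc, hg']
    rcases hcv : g.getD (g.length - 1) (0, 0, "") with ⟨c1, c2, ct⟩
    rw [hcv] at hlast hc
    by_cases hb1 : (s[k + 1]).1 ≥ c2
    · have hM : pvMergeStep ir oc g s[k + 1] = g ++ [s[k + 1]] := by
        simp [pvMergeStep, hlast, not_lt.mpr hb1]
      rw [if_pos hb1, hidx2, hsetR g _ rfl, hM]
      refine ⟨by simp, by simp, by simp; try omega⟩
    · have hlt2 : (s[k + 1]).1 < c2 := by omega
      by_cases hb2 : (s[k + 1]).2.2 = ct
      · have hM : pvMergeStep ir oc g s[k + 1] = g.dropLast ++ [(c1, (s[k + 1]).2.1, ct)] := by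
          simp [pvMergeStep, hlast, hlt2, hb2]
        rw [if_neg hb1, if_pos hb2, hsetL _, hM]
        refine ⟨by simp [hdl, hidx2], by simp [hdl]; try omega, by simp [hdl]; try omega⟩
      · by_cases hb3 : PySem.Str.endswith ct (PySem.Str.slice (s[k + 1]).2.2 none (some oc)) = true
        · have hb3' := hb3
          try simp at hb3'
          have hM : pvMergeStep ir oc g s[k + 1] =
              g.dropLast ++ [(c1, (s[k + 1]).2.1, ct ++ PySem.Str.slice (s[k + 1]).2.2 (some oc) none)] := by
            simp [pvMergeStep, hlast, hlt2, hb2, hb3']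
          rw [if_neg hb1, if_neg hb2, if_pos hb3, hsetL _, hM]
          refine ⟨by simp [hdl, hidx2], by simp [hdl]; try omega, by simp [hdl]; try omega⟩
        · have hb3' := hb3
          try simp at hb3'
          have hM : pvMergeStep ir oc g s[k + 1] =
              g.dropLast ++ [(c1, (s[k + 1]).1, ct)] ++ [s[k + 1]] := by
            simp [pvMergeStep, hlast, hlt2, hb2, hb3']
          rw [if_neg hb1, if_neg hb2, if_neg hb3, hsetL _, hidx2,
            hsetR (g.dropLast ++ [(c1, (s[k + 1]).1, ct)]) _ (by simp [hdl]; try omega), hM]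
          refine ⟨by simp [hdl]; try omega, by simp [hdl], by simp [hdl]; try omega⟩

-- Compaction of the normalized stream equals the merge fold.
theorem pvCompactEq (ir : Bool) (oc : Int) (s : List (Int × Int × String)) :
    pvCompact ir oc s = s.foldl (pvMergeStep ir oc) [] := by
  cases s with
  | nil => rfl
  | cons a t =>
    obtain ⟨hst, h1, hle⟩ := pvCompactInv ir oc (a :: t) (by simp) ((a :: t).length - 1) (by simp)
    have htake : (a :: t).take ((a :: t).length - 1 + 1) = a :: t := by simp
    rw [htake] at hst h1 hle
    unfold pvCompact
    rw [hst]
    have hw : ((a :: t).foldl (pvMergeStep ir oc) []).length - 1 + 1 =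
        ((a :: t).foldl (pvMergeStep ir oc) []).length := by omega
    simp only [hw]
    exact List.take_left

-- Seeding with the optional last segment = folding over the prepended stream.
theorem pvSeedEq (ir : Bool) (oc : Int) (ls : Option (Int × Int × String))
    (ns : List (Int × Int × String)) :
    ns.foldl (pvMergeStep ir oc) (match ls with | some seg => [seg] | none => []) =
      ((match ls with | some seg => [seg] | none => []) ++ ns).foldl (pvMergeStep ir oc) [] := by
  cases ls with
  | none => rfl
  | some x => simp [pvMergeStep]

-- ===== VERDICT (by name: the statement is the Claim_ definition above) =====
theorem fix_whisper_timestamps_spec : Claim_equal_fix_whisper_timestamps := by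
  intro last_segment segments result_offset_ms start_ms end_ms overlap_chars is_retry _ _
  unfold Spec_fix_whisper_timestamps
  unfold fix_whisper_timestamps fix_whisper_timestamps_alt
  rw [pvBodyEq, pvFoldlFilterMap]
  have hb : ∀ init, segments.foldl (fun buf seg =>
      let t1 := seg.1 + result_offset_ms
      let t2 := seg.2.1 + result_offset_ms
      let txt := PySem.Str.strip seg.2.2
      if t1 < max start_ms end_ms ∧ txt ≠ "" then
        let a := max t1 start_ms
        let b := min t2 end_ms
        if a ≠ b then buf ++ [(a, b, txt)] else buf
      else buf) init =
      init ++ segments.filterMap (pvNormalize result_offset_ms start_ms end_ms) := by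
    intro init
    rw [← pvFoldlAppendToList (pvNormalize result_offset_ms start_ms end_ms) segments init]
    congr 1
    funext acc seg
    exact pvBNormBody result_offset_ms start_ms end_ms acc seg
  rw [hb, pvCompactEq, pvSeedEq]
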